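-- pv_equiv track=rewrite | github.com/ashokmedar15/AgroSenseAI | app/app.py | determine_crop_from_class
-- ===== SOURCE A (Python) =====
-- crops = ["apple" , "potato" , "tomato"]
--
-- pests = {
--     "apple": ["Apple_Anthracnose" , "Apple_Aphids" , "Apple_Fruit_Fly" , "Apple_Powdery_Mildew"] ,
--     "potato": ["Potato_Beetle" , "Potato_Tomato_Late_Blight" , "Potato_Early_blight"] ,
--     "tomato": ["Tomato_Powdery_Mildew" , "Tomato_Aphids" , "Tomato_Leaf_Curl_Virus" , "Tomato_Late_blight"]
-- }
--
-- healthy = {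
--     "apple": ["Apple___healthy"] ,
--     "potato": ["Potato___healthy"] ,
--     "tomato": ["Tomato___healthy"]
-- }
--
-- diseases = {
--     "apple": ["Apple___Apple_scab" , "Apple___Black_rot" , "Apple___Cedar_apple_rust"] ,
--     "potato": ["Potato___Early_blight" , "Potato___Late_blight"] ,
--     "tomato": ["Tomato___Bacterial_spot" , "Tomato___Early_blight" , "Tomato___Late_blight" ,
--                "Tomato___Leaf_Mold" , "Tomato___Septoria_leaf_spot" , "Tomato___Target_Spot" ,
--                "Tomato___Tomato_mosaic_virus" , "Tomato___Tomato_Yellow_Leaf_Curl_Virus"]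
-- }
--
-- def determine_crop_from_class(pred_class):
--     for crop in crops:
--         if pred_class in healthy[crop]:
--             return crop
--         if pred_class in diseases[crop]:
--             return crop
--         if pred_class in pests[crop]:
--             return crop
--     return "unknown"  # Fallback if class not found (shouldn't happen)
-- ===== SOURCE B (Python) =====
-- # All known class labels; every label starts with its crop name followed by '_',
-- # so the crop is recovered from the label itself instead of scanning per-crop tables.
-- KNOWN_LABELS = set("""
-- Apple___healthy Apple___Apple_scab Apple___Black_rot Apple___Cedar_apple_rust
-- Apple_Anthracnose Apple_Aphids Apple_Fruit_Fly Apple_Powdery_Mildew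
-- Potato___healthy Potato___Early_blight Potato___Late_blight
-- Potato_Beetle Potato_Tomato_Late_Blight Potato_Early_blight
-- Tomato___healthy Tomato___Bacterial_spot Tomato___Early_blight Tomato___Late_blight
-- Tomato___Leaf_Mold Tomato___Septoria_leaf_spot Tomato___Target_Spot
-- Tomato___Tomato_mosaic_virus Tomato___Tomato_Yellow_Leaf_Curl_Virus
-- Tomato_Powdery_Mildew Tomato_Aphids Tomato_Leaf_Curl_Virus Tomato_Late_blight
-- """.split())
--
-- def determine_crop_from_class(pred_class):
--     if pred_class in KNOWN_LABELS:
--         return pred_class.split('_')[0].lower()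
--     return "unknown"
-- ===== Notes on version B (the rewrite author's own statement) =====
-- stated objective: simpler
-- what changed: Replaces the per-call loop over crops with three per-crop membership tests by one membership test in a flat set of all known labels plus computing the crop directly from the label's own prefix (first underscore-delimited token, lowercased), with the same fallback string for labels not in the set.
import Mathlib
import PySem

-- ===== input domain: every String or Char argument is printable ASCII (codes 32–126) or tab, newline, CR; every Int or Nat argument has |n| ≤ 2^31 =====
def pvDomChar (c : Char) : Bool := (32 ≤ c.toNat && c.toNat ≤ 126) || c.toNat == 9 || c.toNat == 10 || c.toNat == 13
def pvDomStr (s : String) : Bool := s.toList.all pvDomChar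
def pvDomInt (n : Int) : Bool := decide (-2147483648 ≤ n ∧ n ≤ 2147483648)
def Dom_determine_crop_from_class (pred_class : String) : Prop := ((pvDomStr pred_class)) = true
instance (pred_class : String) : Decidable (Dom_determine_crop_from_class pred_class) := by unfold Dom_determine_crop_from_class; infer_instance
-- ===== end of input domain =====

-- B replaces A's per-call loop over crops with three per-crop membership tests by a single
-- membership test in a flat label set plus deriving the crop from the label's own prefix;
-- objective: simpler.

-- ===== PORT A =====
def cropsA : List String := ["apple", "potato", "tomato"]

def pestsA : PySem.Dict String (List String) := PySem.Dict.ofList [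
  ("apple", ["Apple_Anthracnose", "Apple_Aphids", "Apple_Fruit_Fly", "Apple_Powdery_Mildew"]),
  ("potato", ["Potato_Beetle", "Potato_Tomato_Late_Blight", "Potato_Early_blight"]),
  ("tomato", ["Tomato_Powdery_Mildew", "Tomato_Aphids", "Tomato_Leaf_Curl_Virus", "Tomato_Late_blight"])]

def healthyA : PySem.Dict String (List String) := PySem.Dict.ofList [
  ("apple", ["Apple___healthy"]),
  ("potato", ["Potato___healthy"]),
  ("tomato", ["Tomato___healthy"])]

def diseasesA : PySem.Dict String (List String) := PySem.Dict.ofList [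
  ("apple", ["Apple___Apple_scab", "Apple___Black_rot", "Apple___Cedar_apple_rust"]),
  ("potato", ["Potato___Early_blight", "Potato___Late_blight"]),
  ("tomato", ["Tomato___Bacterial_spot", "Tomato___Early_blight", "Tomato___Late_blight", "Tomato___Leaf_Mold", "Tomato___Septoria_leaf_spot", "Tomato___Target_Spot", "Tomato___Tomato_mosaic_virus", "Tomato___Tomato_Yellow_Leaf_Curl_Virus"])]

-- dict[crop]: every crop in cropsA is a key of all three dicts, so KeyError never occurs;
-- getD [] is exact here.
def loopA (pred_class : String) : List String → String
  | [] => "unknown"  -- Fallback if class not found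
  | crop :: rest =>
    if (healthyA.getD crop []).contains pred_class then crop
    else if (diseasesA.getD crop []).contains pred_class then crop
    else if (pestsA.getD crop []).contains pred_class then crop
    else loopA pred_class rest

def determine_crop_from_class (pred_class : String) : String :=
  loopA pred_class cropsA

-- ===== PORT B =====
-- KNOWN_LABELS = """...""".split() (order irrelevant: used only for membership; PySem.Set)
def knownLabels : PySem.Set String := PySem.Set.ofList (PySem.Str.split₀ "
Apple___healthy Apple___Apple_scab Apple___Black_rot Apple___Cedar_apple_rust
Apple_Anthracnose Apple_Aphids Apple_Fruit_Fly Apple_Powdery_Mildew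
Potato___healthy Potato___Early_blight Potato___Late_blight
Potato_Beetle Potato_Tomato_Late_Blight Potato_Early_blight
Tomato___healthy Tomato___Bacterial_spot Tomato___Early_blight Tomato___Late_blight
Tomato___Leaf_Mold Tomato___Septoria_leaf_spot Tomato___Target_Spot
Tomato___Tomato_mosaic_virus Tomato___Tomato_Yellow_Leaf_Curl_Virus
Tomato_Powdery_Mildew Tomato_Aphids Tomato_Leaf_Curl_Virus Tomato_Late_blight
")

def determine_crop_from_class_alt (pred_class : String) : String :=
  if PySem.Set.contains knownLabels pred_class then
    -- pred_class.split('_')[0]: split? is none only for sep = "", and its result is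
    -- always nonempty, so getD []/headD "" are exact here
    PySem.Str.lower (((PySem.Str.split? pred_class "_").getD []).headD "")
  else "unknown"

-- ===== PRECONDITION & SPEC =====
def Spec_determine_crop_from_class (pred_class : String) (out : String) : Prop := out = determine_crop_from_class_alt pred_class
instance (pred_class : String) (out : String) : Decidable (Spec_determine_crop_from_class pred_class out) := by unfold Spec_determine_crop_from_class; infer_instance

-- ===== CLAIM (what is proved, stated in full; the proofs are below) =====
def Claim_equal_determine_crop_from_class : Prop := ∀ (pred_class : String), Dom_determine_crop_from_class pred_class → Spec_determine_crop_from_class pred_class (determine_crop_from_class pred_class)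

-- ===== LEMMAS AND PROOFS =====

set_option maxRecDepth 100000 in
set_option maxHeartbeats 2000000 in
theorem knownLabels_eval : knownLabels = ["Apple___healthy", "Apple___Apple_scab", "Apple___Black_rot", "Apple___Cedar_apple_rust", "Apple_Anthracnose", "Apple_Aphids", "Apple_Fruit_Fly", "Apple_Powdery_Mildew", "Potato___healthy", "Potato___Early_blight", "Potato___Late_blight", "Potato_Beetle", "Potato_Tomato_Late_Blight", "Potato_Early_blight", "Tomato___healthy", "Tomato___Bacterial_spot", "Tomato___Early_blight", "Tomato___Late_blight", "Tomato___Leaf_Mold", "Tomato___Septoria_leaf_spot", "Tomato___Target_Spot", "Tomato___Tomato_mosaic_virus", "Tomato___Tomato_Yellow_Leaf_Curl_Virus", "Tomato_Powdery_Mildew", "Tomato_Aphids", "Tomato_Leaf_Curl_Virus", "Tomato_Late_blight"] := by decide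

-- ===== VERDICT (by name: the statement is the Claim_ definition above) =====
theorem determine_crop_from_class_spec : Claim_equal_determine_crop_from_class := by
  intro pred_class _
  unfold Spec_determine_crop_from_class
  by_cases h : pred_class ∈ knownLabels
  · rw [knownLabels_eval] at h
    simp only [List.mem_cons, List.not_mem_nil, or_false] at h
    rcases h with h|h|h|h|h|h|h|h|h|h|h|h|h|h|h|h|h|h|h|h|h|h|h|h|h|h|h <;> subst h <;>
      · unfold determine_crop_from_class_alt
        rw [knownLabels_eval]
        decide
  · have halt : determine_crop_from_class_alt pred_class = "unknown" := by
      unfold determine_crop_from_class_alt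
      simp [PySem.Set.contains, h]
    have hmem := h
    rw [knownLabels_eval] at hmem
    simp only [List.mem_cons, List.not_mem_nil, or_false, not_or] at hmem
    obtain ⟨n1, n2, n3, n4, n5, n6, n7, n8, n9, n10, n11, n12, n13, n14, n15, n16, n17, n18,
      n19, n20, n21, n22, n23, n24, n25, n26, n27⟩ := hmem
    have e1 : healthyA.getD "apple" [] = ["Apple___healthy"] := by decide
    have e2 : healthyA.getD "potato" [] = ["Potato___healthy"] := by decide
    have e3 : healthyA.getD "tomato" [] = ["Tomato___healthy"] := by decide
    have e4 : diseasesA.getD "apple" [] = ["Apple___Apple_scab", "Apple___Black_rot", "Apple___Cedar_apple_rust"] := by decide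
    have e5 : diseasesA.getD "potato" [] = ["Potato___Early_blight", "Potato___Late_blight"] := by decide
    have e6 : diseasesA.getD "tomato" [] = ["Tomato___Bacterial_spot", "Tomato___Early_blight", "Tomato___Late_blight", "Tomato___Leaf_Mold", "Tomato___Septoria_leaf_spot", "Tomato___Target_Spot", "Tomato___Tomato_mosaic_virus", "Tomato___Tomato_Yellow_Leaf_Curl_Virus"] := by decide
    have e7 : pestsA.getD "apple" [] = ["Apple_Anthracnose", "Apple_Aphids", "Apple_Fruit_Fly", "Apple_Powdery_Mildew"] := by decide
    have e8 : pestsA.getD "potato" [] = ["Potato_Beetle", "Potato_Tomato_Late_Blight", "Potato_Early_blight"] := by decide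
    have e9 : pestsA.getD "tomato" [] = ["Tomato_Powdery_Mildew", "Tomato_Aphids", "Tomato_Leaf_Curl_Virus", "Tomato_Late_blight"] := by decide
    rw [halt]
    simp only [determine_crop_from_class, cropsA, loopA,
      e1, e2, e3, e4, e5, e6, e7, e8, e9]
    simp [List.contains_eq_mem, n1, n2, n3, n4, n5, n6, n7, n8, n9, n10, n11, n12, n13, n14,
      n15, n16, n17, n18, n19, n20, n21, n22, n23, n24, n25, n26, n27]
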